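-- pv_equiv track=rewrite | github.com/GiammaFer75/Proteogenome_3 | Proteogenome3/pg_data_cleaning.py | FASTA_cpt_seq
-- ===== SOURCE A (Python) =====
-- def FASTA_cpt_seq(list_rows):
--     """
--     Version: 1.0
--     Name History: FASTA_cpt_seq
--
--     This function compact the sequence after each FASTA header.
--     It is possible that FASTA files downloaded from online sources could have
--     the sequences splitted in multiple rows by '\n'.
--     The purpose is to arrange each sequence in a unique string.
--
--     :param  list_rows   List[Str]   List of rows of a FASTA file.:
--     :return seq_compa   List[Str]   List of rows of a FASTA file with the sequences compacted in unique rows.: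
--     """
--     seq_compa = []
--     sequence_row = ''
--
--     for row in list_rows:
--         if (len(row) > 0) and (row[0] == '>'):
--             if sequence_row != '':  # If the sequence line is empty but there is a FASTA header than this is the first header.
--                 seq_compa.append(
--                     sequence_row)  # Otherwise, it is a sequence that belongs to the current header and then it can be appended.
--             seq_compa.append(row)  # If the current line is a FASTA header then append to the list.
--             sequence_row = ''  # This means that you are expecting for a new sequence into the next rows.
--         else:
--             sequence_row += row  # Append the current part of sequence to the whole sequence.
--     return seq_compa
-- ===== SOURCE B (Python) =====
-- def FASTA_cpt_seq(list_rows):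
--     """Compact multi-row FASTA sequences: header positions are indexed first,
--     then each inter-header block is joined in one slice."""
--     headers = [(i, row) for i, row in enumerate(list_rows) if row[:1] == '>']
--     seq_compa = []
--     prev = 0
--     for i, row in headers:
--         seq = ''.join(list_rows[prev:i])
--         if seq:
--             seq_compa.append(seq)
--         seq_compa.append(row)
--         prev = i + 1
--     return seq_compa
-- ===== Notes on version B (the rewrite author's own statement) =====
-- stated objective: alternative
-- what changed: Instead of one pass with a running string accumulator, B first builds the list of header positions via enumerate and then joins each inter-header block with a single slice+''.join, naturally dropping the trailing block after the last header as A does.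
import Mathlib
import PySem

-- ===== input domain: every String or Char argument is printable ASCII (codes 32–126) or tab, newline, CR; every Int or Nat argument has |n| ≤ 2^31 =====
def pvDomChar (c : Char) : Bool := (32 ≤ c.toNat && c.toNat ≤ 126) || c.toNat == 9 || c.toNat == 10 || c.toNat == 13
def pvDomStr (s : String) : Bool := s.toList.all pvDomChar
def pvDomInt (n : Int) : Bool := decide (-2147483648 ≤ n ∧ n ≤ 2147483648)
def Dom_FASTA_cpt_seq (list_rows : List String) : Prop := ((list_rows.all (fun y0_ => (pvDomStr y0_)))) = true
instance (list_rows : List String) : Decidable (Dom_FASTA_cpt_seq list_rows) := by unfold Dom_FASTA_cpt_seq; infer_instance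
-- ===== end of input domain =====

-- B rewrites A by a different decomposition: header positions are indexed first, each
-- inter-header block is then joined in one slice; same cost, no speed claim.

-- ===== PORT A =====
-- 'sequence_row' is carried as its character list (String.ofList at append time):
-- Lean's own String.append is avoided, as PYSEM.md directs; the characters are the same.
def FASTA_cpt_seq (list_rows : List String) : List String :=
  (list_rows.foldl
    (fun (st : List String × List Char) row =>
      -- if (len(row) > 0) and (row[0] == '>'):
      if 0 < PySem.Str.len row ∧ PySem.List.pyGet? row.toList 0 = some '>' then
        ((if st.2 ≠ [] then st.1 ++ [String.ofList st.2] else st.1) ++ [row], ([] : List Char))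
      else
        (st.1, st.2 ++ row.toList))
    ([], [])).1

-- ===== PORT B =====
-- row[:1] == '>'
def pvIsHdrB (row : String) : Bool := PySem.List.slice row.toList none (some (1 : Int)) == ['>']

def FASTA_cpt_seq_alt (list_rows : List String) : List String :=
  let headers := (PySem.List.enumerate list_rows).filter (fun p => pvIsHdrB p.2)
  (headers.foldl
    (fun (st : List String × Int) p =>
      let seq := PySem.Str.join "" (PySem.List.slice list_rows (some st.2) (some p.1))
      ((if seq ≠ "" then st.1 ++ [seq] else st.1) ++ [p.2], p.1 + 1))
    ([], (0 : Int))).1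

-- ===== PRECONDITION & SPEC =====
def Spec_FASTA_cpt_seq (list_rows : List String) (out : List String) : Prop := out = FASTA_cpt_seq_alt list_rows
instance (list_rows : List String) (out : List String) : Decidable (Spec_FASTA_cpt_seq list_rows out) := by unfold Spec_FASTA_cpt_seq; infer_instance

-- ===== CLAIM (what is proved, stated in full; the proofs are below) =====
def Claim_equal_FASTA_cpt_seq : Prop := ∀ (list_rows : List String), Dom_FASTA_cpt_seq list_rows → Spec_FASTA_cpt_seq list_rows (FASTA_cpt_seq list_rows)

-- ===== LEMMAS AND PROOFS =====

-- reference recursion (emission-order form of A's loop)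
def fRef : List String → List Char → List String
  | [], _ => []
  | r :: rest, seq =>
    if 0 < PySem.Str.len r ∧ PySem.List.pyGet? r.toList 0 = some '>' then
      (if seq ≠ [] then [String.ofList seq] else []) ++ r :: fRef rest []
    else fRef rest (seq ++ r.toList)

lemma hdr_iff (r : String) :
    (0 < PySem.Str.len r ∧ PySem.List.pyGet? r.toList 0 = some '>') ↔ pvIsHdrB r = true := by
  unfold pvIsHdrB
  rw [show (1 : Int) = ((1 : Nat) : Int) from rfl, PySem.List.slice_to_natCast]
  cases h : r.toList with
  | nil => simp [h, PySem.Str.len, PySem.List.pyGet?, PySem.List.pyIdx?]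
  | cons c cs =>
      simp [h, PySem.Str.len]

lemma foldA (rows : List String) : ∀ (acc : List String) (seq : List Char),
    (rows.foldl
      (fun (st : List String × List Char) row =>
        if 0 < PySem.Str.len row ∧ PySem.List.pyGet? row.toList 0 = some '>' then
          ((if st.2 ≠ [] then st.1 ++ [String.ofList st.2] else st.1) ++ [row], ([] : List Char))
        else
          (st.1, st.2 ++ row.toList))
      (acc, seq)).1 = acc ++ fRef rows seq := by
  induction rows with
  | nil => intro acc seq; simp [fRef]
  | cons r rest ih =>
      intro acc seq
      simp only [List.foldl_cons, fRef]
      by_cases h : 0 < PySem.Str.len r ∧ PySem.List.pyGet? r.toList 0 = some '>'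
      · simp only [if_pos h, ih]
        by_cases hs : seq ≠ [] <;> simp [hs]
      · simp only [if_neg h, ih]

def charsBetween (full : List String) (prev k : Nat) : List Char :=
  ((full.drop prev).take (k - prev)).flatMap String.toList

lemma intercalate_nil_chars (ll : List (List Char)) :
    List.intercalate ([] : List Char) ll = ll.flatten := by
  induction ll with
  | nil => rfl
  | cons a l ih =>
      cases l with
      | nil => simp [List.intercalate]
      | cons b m =>
          simp [List.intercalate, List.intersperse] at *
          simpa using ih

lemma join_empty (parts : List String) :
    PySem.Str.join "" parts = String.ofList (parts.flatMap String.toList) := by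
  have h : (PySem.Str.join "" parts).toList = parts.flatMap String.toList := by
    rw [PySem.Str.toList_join]
    simpa [PySem.Chars.join, List.flatMap_def] using intercalate_nil_chars (parts.map String.toList)
  rw [← h, String.ofList_toList]

lemma charsBetween_succ (full : List String) (prev k : Nat) (r : String)
    (hk : full.drop k = r :: List.drop (k+1) full) (hpk : prev ≤ k) :
    charsBetween full prev (k+1) = charsBetween full prev k ++ r.toList := by
  unfold charsBetween
  have hget : full[k]? = some r := by
    have : (List.drop k full)[0]? = full[k + 0]? := List.getElem?_drop
    simpa [hk] using this.symm
  have h1 : k + 1 - prev = (k - prev) + 1 := by omega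
  rw [h1, List.take_add_one]
  have h2 : (full.drop prev)[k - prev]? = some r := by
    have h3 : (List.drop prev full)[k - prev]? = full[prev + (k - prev)]? := List.getElem?_drop
    have h4 : prev + (k - prev) = k := by omega
    rw [h3, h4, hget]
  simp [h2]

lemma foldB (full : List String) : ∀ (rest : List String) (k : Nat), full.drop k = rest →
    ∀ (acc : List String) (prev : Nat), prev ≤ k →
    (((PySem.List.enumerate rest (k : Int)).filter (fun p => pvIsHdrB p.2)).foldl
      (fun (st : List String × Int) p =>
        let seq := PySem.Str.join "" (PySem.List.slice full (some st.2) (some p.1))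
        ((if seq ≠ "" then st.1 ++ [seq] else st.1) ++ [p.2], p.1 + 1))
      (acc, (prev : Int))).1 = acc ++ fRef rest (charsBetween full prev k) := by
  intro rest
  induction rest with
  | nil => intro k hk acc prev hp; simp [PySem.List.enumerate_nil, fRef]
  | cons r rest' ih =>
      intro k hk acc prev hp
      have hdrop : full.drop (k+1) = rest' := by
        have : (full.drop k).tail = rest' := by rw [hk]; rfl
        rwa [List.tail_drop] at this
      have hk' : full.drop k = r :: List.drop (k+1) full := by rw [hdrop]; exact hk
      rw [PySem.List.enumerate_cons]
      by_cases hB : pvIsHdrB r = true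
      · -- header row
        simp only [List.filter_cons, hB, if_pos, List.foldl_cons]
        have hseq : PySem.Str.join "" (PySem.List.slice full (some (prev : Int)) (some (k : Int)))
            = String.ofList (charsBetween full prev k) := by
          rw [PySem.List.slice_natCast, join_empty]; rfl
        have hcast : ((k : Int) + 1) = ((k + 1 : Nat) : Int) := by push_cast; ring
        rw [hcast]
        rw [ih (k+1) hdrop _ (k+1) (le_refl _)]
        have hfr : fRef (r :: rest') (charsBetween full prev k)
            = (if charsBetween full prev k ≠ [] then [String.ofList (charsBetween full prev k)] else [])
              ++ r :: fRef rest' [] := by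
          rw [fRef, if_pos ((hdr_iff r).mpr hB)]
        have hcb : charsBetween full (k+1) (k+1) = [] := by
          unfold charsBetween; simp
        rw [hcb, hfr]
        simp only [hseq]
        by_cases hne : charsBetween full prev k = []
        · simp [hne]
        · have : String.ofList (charsBetween full prev k) ≠ "" := by
            simpa using hne
          simp [hne, this]
      · -- non-header row
        simp only [List.filter_cons, hB, Bool.false_eq_true, ite_false]
        have hcast : ((k : Int) + 1) = ((k + 1 : Nat) : Int) := by push_cast; ring
        rw [hcast, ih (k+1) hdrop acc prev (by omega)]
        have hfr : fRef (r :: rest') (charsBetween full prev k)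
            = fRef rest' (charsBetween full prev k ++ r.toList) := by
          rw [fRef, if_neg]
          intro hc
          exact hB ((hdr_iff r).mp hc)
        rw [hfr, charsBetween_succ full prev k r hk' hp]

-- ===== VERDICT (by name: the statement is the Claim_ definition above) =====
theorem FASTA_cpt_seq_spec : Claim_equal_FASTA_cpt_seq := by
  intro rows _
  unfold Spec_FASTA_cpt_seq FASTA_cpt_seq FASTA_cpt_seq_alt
  rw [foldA rows [] []]
  have h := foldB rows rows 0 (by simp) [] 0 (le_refl 0)
  simp only [Nat.cast_zero] at h
  rw [h]
  rfl
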